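-- pv_equiv track=rewrite | github.com/opkpEh/heart.live | app.py | apply_diagonal_rainbow
-- ===== SOURCE A (Python) =====
-- COLORS = [
--     '\033[31m',  # red
--     '\033[33m',  # yellow
--     '\033[32m',  # green
--     '\033[36m',  # cyan
--     '\033[34m',  # blue
--     '\033[35m',  # magenta
-- ]
--
-- COLOR_RESET = '\033[0m'
--
-- def apply_diagonal_rainbow(frame, frame_count):
--     """Apply diagonal rainbow colors to the frame."""
--     lines = frame.split('\n')
--     colored_lines = []
--
--     for y, line in enumerate(lines):
--         if not line.strip():  # Skip empty lines
--             colored_lines.append(line)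
--             continue
--
--         colored_chars = []
--         for x, char in enumerate(line):
--             if char.strip():  # Only color visible characters
--                 # Calculate color index based on diagonal position and frame count
--                 color_idx = (x + y + frame_count) % len(COLORS)
--                 colored_chars.append(f"{COLORS[color_idx]}{char}{COLOR_RESET}")
--             else:
--                 colored_chars.append(char)
--
--         colored_lines.append(''.join(colored_chars))
--
--     return '\n'.join(colored_lines)
-- ===== SOURCE B (Python) =====
-- COLORS = [
--     '\033[31m',  # red
--     '\033[33m',  # yellow
--     '\033[32m',  # green
--     '\033[36m',  # cyan
--     '\033[34m',  # blue
--     '\033[35m',  # magenta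
-- ]
--
-- COLOR_RESET = '\033[0m'
--
-- def apply_diagonal_rainbow(frame, frame_count):
--     """Apply diagonal rainbow colors to the frame (single flat pass)."""
--     out = []
--     x = 0
--     y = 0
--     for ch in frame:
--         if ch == '\n':
--             out.append('\n')
--             x = 0
--             y += 1
--         elif ch.strip():
--             out.append(f"{COLORS[(x + y + frame_count) % len(COLORS)]}{ch}{COLOR_RESET}")
--             x += 1
--         else:
--             out.append(ch)
--             x += 1
--     return ''.join(out)
-- ===== Notes on version B (the rewrite author's own statement) =====
-- stated objective: simpler
-- what changed: Replaces split('\n') plus two nested enumerate loops (with a per-line whitespace-only shortcut) and a join by one flat pass over the whole string that tracks x,y coordinates itself, resetting x at each newline; whitespace-only lines need no special case since whitespace characters pass through unchanged.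
import Mathlib
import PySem

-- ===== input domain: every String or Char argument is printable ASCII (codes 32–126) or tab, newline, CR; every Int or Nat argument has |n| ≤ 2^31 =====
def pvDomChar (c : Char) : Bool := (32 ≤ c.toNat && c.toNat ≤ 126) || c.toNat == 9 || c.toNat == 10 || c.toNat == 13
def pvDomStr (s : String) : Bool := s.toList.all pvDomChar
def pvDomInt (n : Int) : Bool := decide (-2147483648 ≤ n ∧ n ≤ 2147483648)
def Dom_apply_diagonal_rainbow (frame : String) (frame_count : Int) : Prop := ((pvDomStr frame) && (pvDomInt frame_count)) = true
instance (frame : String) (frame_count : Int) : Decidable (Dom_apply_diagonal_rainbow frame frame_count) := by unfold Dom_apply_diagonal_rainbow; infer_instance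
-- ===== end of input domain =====

-- B replaces split('\n') + nested per-line/per-char loops (with a whitespace-only-line shortcut)
-- by one flat pass over the string maintaining x,y coordinates; same return value.

-- module constants COLORS and COLOR_RESET, as lists of code points ('\033' = ESC = U+001B)
def pvColors : List (List Char) :=
  [['\x1b', '[', '3', '1', 'm'],
   ['\x1b', '[', '3', '3', 'm'],
   ['\x1b', '[', '3', '2', 'm'],
   ['\x1b', '[', '3', '6', 'm'],
   ['\x1b', '[', '3', '4', 'm'],
   ['\x1b', '[', '3', '5', 'm']]

def pvReset : List Char := ['\x1b', '[', '0', 'm']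

-- ===== PORT A =====
-- literal port: split on '\n'; for each (y, line): whitespace-only lines pass through,
-- otherwise each (x, char) is colored iff char.strip() is truthy; join with '\n'.
def apply_diagonal_rainbow (frame : String) (frame_count : Int) : String :=
  let lines := PySem.Chars.splitOn frame.toList ['\n']
  let colored_lines := (PySem.List.enumerate lines).map (fun yl =>
    if (PySem.Chars.strip yl.2).isEmpty then yl.2
    else ((PySem.List.enumerate yl.2).map (fun xc =>
      if (PySem.Chars.strip [xc.2]).isEmpty = false then
        PySem.List.pyGetD pvColors (PySem.Int.mod (xc.1 + yl.1 + frame_count) (pvColors.length : Int)) []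
          ++ [xc.2] ++ pvReset
      else [xc.2])).flatten)
  String.mk (PySem.Chars.join ['\n'] colored_lines)

-- ===== PORT B =====
-- literal port of Source B's single pass: x,y maintained across the whole string, x reset at '\n'
def pvAltGo (fc : Int) : List Char → Int → Int → List Char
  | [], _, _ => []
  | c :: rest, x, y =>
    if c = '\n' then '\n' :: pvAltGo fc rest 0 (y + 1)
    else if (PySem.Chars.strip [c]).isEmpty = false then
      (PySem.List.pyGetD pvColors (PySem.Int.mod (x + y + fc) (pvColors.length : Int)) []
        ++ [c] ++ pvReset) ++ pvAltGo fc rest (x + 1) y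
    else c :: pvAltGo fc rest (x + 1) y

def apply_diagonal_rainbow_alt (frame : String) (frame_count : Int) : String :=
  String.mk (pvAltGo frame_count frame.toList 0 0)

-- ===== PRECONDITION & SPEC =====
def Spec_apply_diagonal_rainbow (frame : String) (frame_count : Int) (out : String) : Prop := out = apply_diagonal_rainbow_alt frame frame_count
instance (frame : String) (frame_count : Int) (out : String) : Decidable (Spec_apply_diagonal_rainbow frame frame_count out) := by unfold Spec_apply_diagonal_rainbow; infer_instance

-- ===== CLAIM (what is proved, stated in full; the proofs are below) =====
def Claim_equal_apply_diagonal_rainbow : Prop := ∀ (frame : String) (frame_count : Int), Dom_apply_diagonal_rainbow frame frame_count → Spec_apply_diagonal_rainbow frame frame_count (apply_diagonal_rainbow frame frame_count)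

-- ===== LEMMAS AND PROOFS =====

-- the piece both ports emit for one character at diagonal position x+y
def pvPiece (fc y x : Int) (c : Char) : List Char :=
  if (PySem.Chars.strip [c]).isEmpty = false then
    PySem.List.pyGetD pvColors (PySem.Int.mod (x + y + fc) (pvColors.length : Int)) []
      ++ [c] ++ pvReset
  else [c]

-- coloring one '\n'-free segment starting at column x
def pvColorAll (fc y : Int) : List Char → Int → List Char
  | [], _ => []
  | c :: cs, x => pvPiece fc y x c ++ pvColorAll fc y cs (x + 1)

-- structural version of split('\n'): (first segment, remaining segments)
def pvSplitNLp : List Char → List Char × List (List Char)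
  | [] => ([], [])
  | c :: rest =>
    let p := pvSplitNLp rest
    if c = '\n' then ([], p.1 :: p.2) else (c :: p.1, p.2)

-- rendering the tail segments, each preceded by '\n', line counter y
def pvRenderT (fc : Int) : List (List Char) → Int → List Char
  | [], _ => []
  | l :: ls, y => '\n' :: (pvColorAll fc y l 0 ++ pvRenderT fc ls (y + 1))

theorem pv_go_spec (fuel : Nat) (l cur : List Char) (acc : List (List Char))
    (h : l.length < fuel) :
    PySem.Chars.splitOn.go ['\n'] fuel l cur acc
      = acc.reverse ++ (cur.reverse ++ (pvSplitNLp l).1) :: (pvSplitNLp l).2 := by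
  induction l generalizing fuel cur acc with
  | nil =>
    cases fuel with
    | zero => omega
    | succ f => simp [PySem.Chars.splitOn.go, pvSplitNLp]
  | cons c rest ih =>
    cases fuel with
    | zero => omega
    | succ f =>
      by_cases hc : c = '\n'
      · subst hc
        have hpre : List.isPrefixOf ['\n'] ('\n' :: rest) = true := by
          simp [List.isPrefixOf]
        rw [PySem.Chars.splitOn.go]
        simp only [hpre, if_pos]
        have hd : List.drop (['\n'].length) ('\n' :: rest) = rest := rfl
        rw [hd, ih f [] ((cur.reverse) :: acc) (by simpa using Nat.lt_of_succ_lt_succ h)]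
        simp [pvSplitNLp]
      · have hpre : List.isPrefixOf ['\n'] (c :: rest) = false := by
          simp only [List.isPrefixOf]
          simp
          exact fun h' => hc h'.symm
        rw [PySem.Chars.splitOn.go]
        simp only [hpre, Bool.false_eq_true, if_false]
        rw [ih f (c :: cur) acc (by simpa using Nat.lt_of_succ_lt_succ h)]
        simp [pvSplitNLp, hc]

theorem pv_splitOn_eq (s : List Char) :
    PySem.Chars.splitOn s ['\n'] = (pvSplitNLp s).1 :: (pvSplitNLp s).2 := by
  unfold PySem.Chars.splitOn
  rw [pv_go_spec (s.length + 1) s [] [] (by omega)]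
  simp

-- B's flat pass equals: color the first segment from column x, then render the tail segments
theorem pv_altGo_eq (fc : Int) (s : List Char) (x y : Int) :
    pvAltGo fc s x y
      = pvColorAll fc y (pvSplitNLp s).1 x ++ pvRenderT fc (pvSplitNLp s).2 (y + 1) := by
  induction s generalizing x y with
  | nil => simp [pvAltGo, pvSplitNLp, pvColorAll, pvRenderT]
  | cons c rest ih =>
    by_cases hc : c = '\n'
    · subst hc
      simp only [pvAltGo, pvSplitNLp]
      rw [ih 0 (y + 1)]
      simp [pvColorAll, pvRenderT]
    · simp only [pvAltGo, if_neg hc, pvSplitNLp]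
      by_cases hs : (PySem.Chars.strip [c]).isEmpty = false
      · simp only [hs, if_pos]
        rw [ih (x + 1) y]
        simp [pvColorAll, pvPiece, hs, List.append_assoc]
      · simp only [hs]
        rw [ih (x + 1) y]
        simp [pvColorAll, pvPiece, hs]

-- a whitespace-only segment is colored to itself
theorem pv_strip_empty_all (l : List Char) (h : (PySem.Chars.strip l).isEmpty = true) :
    ∀ c ∈ l, PySem.Chars.isspace c = true := by
  intro c hc
  have hnil : PySem.Chars.strip l = [] := by
    cases hst : PySem.Chars.strip l with
    | nil => rfl
    | cons a t => rw [hst] at h; simp at h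
  unfold PySem.Chars.strip PySem.Chars.rstrip PySem.Chars.lstrip at hnil
  have h1 : List.dropWhile PySem.Chars.isspace
      (List.dropWhile PySem.Chars.isspace l).reverse = [] := by
    have := congrArg List.reverse hnil
    simpa using this
  rw [List.dropWhile_eq_nil_iff] at h1
  rcases List.mem_append.mp ((List.takeWhile_append_dropWhile (p := PySem.Chars.isspace) (l := l)) ▸ hc) with hm | hm
  · exact List.mem_takeWhile_imp hm
  · exact h1 c (List.mem_reverse.mpr hm)

theorem pv_strip_singleton (c : Char) (h : PySem.Chars.isspace c = true) :
    (PySem.Chars.strip [c]).isEmpty = true := by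
  simp [PySem.Chars.strip, PySem.Chars.lstrip, PySem.Chars.rstrip, h]

theorem pv_colorAll_ws (fc y : Int) (l : List Char)
    (h : ∀ c ∈ l, PySem.Chars.isspace c = true) :
    ∀ x, pvColorAll fc y l x = l := by
  induction l with
  | nil => intro x; simp [pvColorAll]
  | cons c cs ih =>
    intro x
    have hc := pv_strip_singleton c (h c (by simp))
    simp [pvColorAll, pvPiece, hc, ih (fun d hd => h d (by simp [hd]))]

-- A's inner loop equals pvColorAll
theorem pv_inner_eq (fc y : Int) (l : List Char) :
    ∀ x0 : Int, ((PySem.List.enumerate l x0).map (fun xc =>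
      if (PySem.Chars.strip [xc.2]).isEmpty = false then
        PySem.List.pyGetD pvColors (PySem.Int.mod (xc.1 + y + fc) (pvColors.length : Int)) []
          ++ [xc.2] ++ pvReset
      else [xc.2])).flatten = pvColorAll fc y l x0 := by
  induction l with
  | nil => intro x0; simp [PySem.List.enumerate, pvColorAll]
  | cons c cs ih =>
    intro x0
    rw [PySem.List.enumerate_cons]
    simp only [List.map_cons, List.flatten_cons, ih (x0 + 1)]
    simp [pvColorAll, pvPiece]

-- A's per-line body (with the whitespace-only shortcut) equals pvColorAll from column 0
theorem pv_line_eq (fc y : Int) (l : List Char) :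
    (if (PySem.Chars.strip l).isEmpty then l
     else ((PySem.List.enumerate l).map (fun xc =>
      if (PySem.Chars.strip [xc.2]).isEmpty = false then
        PySem.List.pyGetD pvColors (PySem.Int.mod (xc.1 + y + fc) (pvColors.length : Int)) []
          ++ [xc.2] ++ pvReset
      else [xc.2])).flatten) = pvColorAll fc y l 0 := by
  by_cases h : (PySem.Chars.strip l).isEmpty
  · rw [if_pos h, pv_colorAll_ws fc y l (pv_strip_empty_all l h) 0]
  · rw [if_neg h]
    exact pv_inner_eq fc y l 0

-- A's outer loop + join over the enumerated lines equals first-line + pvRenderT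
theorem pv_outer_eq (fc : Int) (ps : List (List Char)) :
    ∀ (p : List Char) (y : Int),
    PySem.Chars.join ['\n'] ((PySem.List.enumerate (p :: ps) y).map (fun yl =>
      if (PySem.Chars.strip yl.2).isEmpty then yl.2
      else ((PySem.List.enumerate yl.2).map (fun xc =>
        if (PySem.Chars.strip [xc.2]).isEmpty = false then
          PySem.List.pyGetD pvColors (PySem.Int.mod (xc.1 + yl.1 + fc) (pvColors.length : Int)) []
            ++ [xc.2] ++ pvReset
        else [xc.2])).flatten))
      = pvColorAll fc y p 0 ++ pvRenderT fc ps (y + 1) := by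
  induction ps with
  | nil =>
    intro p y
    rw [PySem.List.enumerate_cons]
    simp only [PySem.List.enumerate, List.map_cons, List.map_nil]
    rw [PySem.Chars.join_singleton]
    simp only [pvRenderT, List.append_nil]
    exact pv_line_eq fc y p
  | cons q qs ih =>
    intro p y
    rw [PySem.List.enumerate_cons, PySem.List.enumerate_cons]
    simp only [List.map_cons]
    rw [PySem.Chars.join_cons_cons]
    have h2 := ih q (y + 1)
    rw [PySem.List.enumerate_cons] at h2
    simp only [List.map_cons] at h2
    rw [h2]
    rw [pv_line_eq fc y p]
    simp [pvRenderT]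

-- ===== VERDICT (by name: the statement is the Claim_ definition above) =====
theorem apply_diagonal_rainbow_spec : Claim_equal_apply_diagonal_rainbow := by
  intro frame fc _
  simp only [Spec_apply_diagonal_rainbow, apply_diagonal_rainbow, apply_diagonal_rainbow_alt]
  rw [pv_splitOn_eq]
  rw [pv_outer_eq fc (pvSplitNLp frame.toList).2 (pvSplitNLp frame.toList).1 0]
  rw [pv_altGo_eq fc frame.toList 0 0]
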